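-- pv_equiv track=rewrite | github.com/gabrielbozek/grykombinatoryczne | program.py | EKG_generator
-- ===== SOURCE A (Python) =====
-- from math import gcd
--
-- def EKG_generator(size):
--     """
--     Generuje ciąg EKG o zadanej długości
--     :param size: Liczba elementów tego ciągu
--     :return: Lista elementów ciągu
--     """
--     #wiemy że ciąg EKG jest ograniozony z góry przez 14
--     if(size==1): return [1]
--     if(size==2): return [1, 2]
--     if(size<1): raise ValueError("Nieprawidłowa długość")
--
--     numberslist=list(range(3, 14*size))
--     EKGlist = [1, 2]
--     for i in range(size-2):
--         index = 0
--         while(gcd(EKGlist[-1], numberslist[index])==1):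
--             index=index+1
--         EKGlist.append(numberslist.pop(index))
--     return EKGlist
-- ===== SOURCE B (Python) =====
-- from math import isqrt
--
-- def _divisors_from_2(n):
--     """All divisors d >= 2 of n, found via divisor pairs up to isqrt(n)."""
--     ds = []
--     for d in range(1, isqrt(n) + 1):
--         if n % d == 0:
--             if d >= 2:
--                 ds.append(d)
--             q = n // d
--             if q >= 2 and q != d:
--                 ds.append(q)
--     return ds
--
-- def EKG_generator(size):
--     """
--     Generuje ciąg EKG o zadanej długości
--     :param size: Liczba elementów tego ciągu
--     :return: Lista elementów ciągu
--     """
--     if size == 1: return [1]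
--     if size == 2: return [1, 2]
--     if size < 1: raise ValueError("Nieprawidłowa długość")
--     limit = 14 * size          # the same upper bound on the terms that A relies on
--     used = {1, 2}
--     ekg = [1, 2]
--     last = 2
--     ptr = {}                   # d -> first multiple of d not yet known to be used
--     for _ in range(size - 2):
--         # next term = smallest unused number sharing a factor with `last`
--         #           = min over divisors d >= 2 of `last` of the smallest unused multiple of d
--         best = None
--         for d in _divisors_from_2(last):
--             m = ptr.get(d, d)
--             while m in used:   # `used` only grows, so the memoized start is sound
--                 m += d
--             ptr[d] = m
--             if m < limit and (best is None or m < best):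
--                 best = m
--         if best is None:
--             raise IndexError("no admissible term below 14*size")  # where A would fail too
--         ekg.append(best)
--         used.add(best)
--         last = best
--     return ekg
-- ===== Notes on version B (the rewrite author's own statement) =====
-- stated objective: faster
-- what changed: Instead of rescanning a shrinking linear-size candidate list with gcd tests and popping by index, B picks each term as the minimum, over the divisors (at least two) of the previous term enumerated in divisor pairs up to the integer square root, of that divisor's smallest unused multiple, with memoized per-divisor scan pointers and a hash set of used numbers.
import Mathlib
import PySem

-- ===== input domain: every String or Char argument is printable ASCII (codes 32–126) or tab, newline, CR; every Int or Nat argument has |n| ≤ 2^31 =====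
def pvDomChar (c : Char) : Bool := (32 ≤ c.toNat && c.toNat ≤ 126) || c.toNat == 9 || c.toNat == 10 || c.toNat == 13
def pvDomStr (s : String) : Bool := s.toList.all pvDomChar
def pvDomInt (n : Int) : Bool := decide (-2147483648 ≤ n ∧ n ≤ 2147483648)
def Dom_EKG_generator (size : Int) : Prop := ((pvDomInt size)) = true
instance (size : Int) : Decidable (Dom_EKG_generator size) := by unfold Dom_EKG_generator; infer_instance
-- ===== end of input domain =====

-- B replaces A's gcd-scan-and-pop over a linear-size candidate list by, per step, the
-- minimum over the divisors ≥ 2 of the previous term of that divisor's smallest unused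
-- multiple (memoized scan pointers, set of used numbers).

-- ===== PORT A =====

-- inner `while gcd(EKGlist[-1], numberslist[index]) == 1: index += 1` + `numberslist.pop(index)`:
-- walk the list until gcd ≠ 1, return that element and the list without it
-- (none = the scan runs past the end, where Python raises IndexError).
def popA (last : Int) : List Int → Option (Int × List Int)
  | [] => none
  | x :: xs =>
    if Int.gcd last x = 1 then
      match popA last xs with
      | none => none
      | some (y, rest) => some (y, x :: rest)
    else some (x, xs)

-- `for i in range(size-2)`: fuel = size-2; `last` carries EKGlist[-1]
def loopA (last : Int) (ekg numbers : List Int) : Nat → List Int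
  | 0 => ekg
  | n + 1 =>
    match popA last numbers with
    | none => ekg                     -- Python raises IndexError here
    | some (x, rest) => loopA x (ekg ++ [x]) rest n

def EKG_generator (size : Int) : List Int :=
  if size = 1 then [1]
  else if size = 2 then [1, 2]
  else if size < 1 then []            -- Python raises ValueError here (outside Pre_)
  else loopA 2 [1, 2] (PySem.List.pyRange 3 (14 * size) 1) (size - 2).toNat

-- ===== PORT B =====

-- _divisors_from_2(n): divisor pairs, d up to isqrt(n)  (math.isqrt = Nat.sqrt)
def divisorsFrom2 (n : Int) : List Int :=
  (PySem.List.pyRange 1 ((Nat.sqrt n.toNat : Int) + 1) 1).foldl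
    (fun ds d =>
      if PySem.Int.mod n d = 0 then
        let q := PySem.Int.floordiv n d
        (ds ++ (if 2 ≤ d then [d] else [])) ++ (if 2 ≤ q ∧ q ≠ d then [q] else [])
      else ds) []

-- `while m in used: m += d`; fuel used.length + 1 always suffices to leave `used`
-- (at most used.length of the scanned multiples can lie in `used`; proved in scanMult_spec)
def scanMult (used : List Int) (d : Int) : Nat → Int → Int
  | 0, m => m
  | k + 1, m => if m ∈ used then scanMult used d k (m + d) else m

-- `for d in _divisors_from_2(last): ...`, updating (best, ptr)
def stepB (limit : Int) (used : List Int) :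
    List Int → Option Int → PySem.Dict Int Int → Option Int × PySem.Dict Int Int
  | [], best, ptr => (best, ptr)
  | d :: ds, best, ptr =>
    let m := scanMult used d (used.length + 1) (ptr.getD d d)
    let best' :=
      match best with
      | none => if m < limit then some m else none
      | some b => if m < limit ∧ m < b then some m else some b
    stepB limit used ds best' (ptr.insert d m)

-- `for _ in range(size - 2)`; `used` is a Python set (PySem.Set)
def loopB (limit last : Int) (ekg : List Int) (used : PySem.Set Int)
    (ptr : PySem.Dict Int Int) : Nat → List Int
  | 0 => ekg
  | n + 1 =>
    match stepB limit used (divisorsFrom2 last) none ptr with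
    | (none, _) => ekg                -- Python raises IndexError here (exactly where A does)
    | (some m, ptr') => loopB limit m (ekg ++ [m]) (PySem.Set.add used m) ptr' n

def EKG_generator_alt (size : Int) : List Int :=
  if size = 1 then [1]
  else if size = 2 then [1, 2]
  else if size < 1 then []            -- Python raises ValueError here (outside Pre_)
  else loopB (14 * size) 2 [1, 2] (PySem.Set.ofList [1, 2]) PySem.Dict.empty (size - 2).toNat

-- ===== PRECONDITION & SPEC =====
-- A raises ValueError for size < 1; everything else is admitted.
def Pre_EKG_generator (size : Int) : Prop := 1 ≤ size
instance (size : Int) : Decidable (Pre_EKG_generator size) := by unfold Pre_EKG_generator; infer_instance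
def pvWitness_EKG_generator : Int := 7

def Spec_EKG_generator (size : Int) (out : List Int) : Prop := out = EKG_generator_alt size
instance (size : Int) (out : List Int) : Decidable (Spec_EKG_generator size out) := by unfold Spec_EKG_generator; infer_instance

-- ===== CLAIM (what is proved, stated in full; the proofs are below) =====
def Claim_equal_EKG_generator : Prop := ∀ (size : Int), Dom_EKG_generator size → Pre_EKG_generator size → Spec_EKG_generator size (EKG_generator size)

-- ===== LEMMAS AND PROOFS =====

-- `r` is the least multiple of `d` (≥ d) that is not in `used`
def IsLUM (used : List Int) (d r : Int) : Prop :=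
  r ∉ used ∧ d ∣ r ∧ d ≤ r ∧ ∀ y, d ∣ y → d ≤ y → y < r → y ∈ used

-- pointer-table invariant: every memoized value is a sound scan start
def Pinv (used : List Int) (ptr : PySem.Dict Int Int) : Prop :=
  ∀ e : Int, e ∣ ptr.getD e e ∧ e ≤ ptr.getD e e ∧
    ∀ y, e ∣ y → e ≤ y → y < ptr.getD e e → y ∈ used

theorem isLUM_unique {used : List Int} {d r r' : Int}
    (h : IsLUM used d r) (h' : IsLUM used d r') : r = r' := by
  rcases h with ⟨hn, hd, hge, hmin⟩
  rcases h' with ⟨hn', hd', hge', hmin'⟩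
  rcases lt_trichotomy r r' with hlt | he | hgt
  · exact absurd (hmin' r hd hge hlt) hn
  · exact he
  · exact absurd (hmin r' hd' hge' hgt) hn'

theorem popA_none {last : Int} {l : List Int} :
    popA last l = none ↔ ∀ x ∈ l, Int.gcd last x = 1 := by
  induction l with
  | nil => simp [popA]
  | cons x xs ih =>
    by_cases h : Int.gcd last x = 1
    · simp only [popA, if_pos h]
      cases hp : popA last xs with
      | none => simpa [hp, h] using ih.mp hp
      | some p =>
        rcases p with ⟨y, rest⟩
        simp only [List.mem_cons]
        constructor
        · intro hc; exact absurd hc (by simp)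
        · intro hall
          have : popA last xs = none := ih.mpr (fun z hz => hall z (Or.inr hz))
          rw [this] at hp; exact absurd hp (by simp)
    · simp [popA, h]

theorem popA_some {last : Int} {l : List Int} {x : Int} {rest : List Int}
    (hs : l.Pairwise (· < ·)) (h : popA last l = some (x, rest)) :
    x ∈ l ∧ Int.gcd last x ≠ 1 ∧ (∀ y ∈ l, Int.gcd last y ≠ 1 → x ≤ y) ∧ rest = l.erase x := by
  induction l generalizing rest with
  | nil => simp [popA] at h
  | cons a xs ih =>
    rcases List.pairwise_cons.mp hs with ⟨ha, hxs⟩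
    by_cases hg : Int.gcd last a = 1
    · simp only [popA, if_pos hg] at h
      cases hp : popA last xs with
      | none => rw [hp] at h; simp at h
      | some p =>
        rcases p with ⟨y, r⟩
        rw [hp] at h
        simp only [Option.some.injEq, Prod.mk.injEq] at h
        rcases h with ⟨hy, hr⟩
        subst hy; subst hr
        rcases ih hxs hp with ⟨hmem, hgn, hmin, hre⟩
        refine ⟨List.mem_cons_of_mem _ hmem, hgn, ?_, ?_⟩
        · intro y hy hgy
          rcases List.mem_cons.mp hy with rfl | hy'
          · exact absurd hg hgy
          · exact hmin y hy' hgy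
        · have hxa : y ≠ a := by rintro rfl; exact absurd hg hgn
          rw [hre, List.erase_cons_tail]
          simp [hxa.symm, beq_iff_eq]
    · simp only [popA, if_neg hg, Option.some.injEq, Prod.mk.injEq] at h
      rcases h with ⟨rfl, rfl⟩
      refine ⟨List.mem_cons_self, hg, ?_, by simp [List.erase_cons_head]⟩
      intro y hy hgy
      rcases List.mem_cons.mp hy with rfl | hy'
      · exact le_refl y
      · exact le_of_lt (ha y hy')

-- pigeonhole: some multiple m0 + d*j, j ≤ |used|, escapes `used`
theorem exists_escape {used : List Int} (hnd : used.Nodup) {d : Int} (hd : 1 ≤ d) (m0 : Int) :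
    ∃ j : Nat, j ≤ used.length ∧ m0 + d * j ∉ used := by
  by_contra hc
  push_neg at hc
  set f : Nat → Int := fun j => m0 + d * j with hf
  have hinj : Function.Injective f := by
    intro a b hab
    simp only [hf, add_right_inj] at hab
    have := mul_left_cancel₀ (by omega : d ≠ 0) hab
    exact_mod_cast this
  have hsub : ((List.range (used.length + 1)).map f) ⊆ used := by
    intro z hz
    rcases List.mem_map.mp hz with ⟨j, hj, rfl⟩
    exact hc j (by simpa using Nat.lt_succ_iff.mp (List.mem_range.mp hj))
  have hndm : ((List.range (used.length + 1)).map f).Nodup :=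
    (List.nodup_range).map hinj
  have hle : ((List.range (used.length + 1)).map f).length ≤ used.length := by
    have h1 : ((List.range (used.length + 1)).map f).toFinset.card =
        ((List.range (used.length + 1)).map f).length := List.toFinset_card_of_nodup hndm
    have h2 : ((List.range (used.length + 1)).map f).toFinset ⊆ used.toFinset := by
      intro z hz
      exact List.mem_toFinset.mpr (hsub (List.mem_toFinset.mp hz))
    have h3 := Finset.card_le_card h2
    have h4 : used.toFinset.card ≤ used.length := used.toFinset_card_le
    omega
  simp at hle

theorem scanMult_go {used : List Int} {d : Int} (hd : 1 ≤ d) :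
    ∀ (k : Nat) (m0 : Int), d ∣ m0 → d ≤ m0 →
    (∀ y, d ∣ y → d ≤ y → y < m0 → y ∈ used) →
    (∃ j : Nat, j < k ∧ m0 + d * j ∉ used) →
    IsLUM used d (scanMult used d k m0) := by
  intro k
  induction k with
  | zero => intro m0 _ _ _ hex; rcases hex with ⟨j, hj, _⟩; omega
  | succ k ih =>
    intro m0 hdvd hge hpre hex
    by_cases hm : m0 ∈ used
    · have hstep : ∀ y, d ∣ y → d ≤ y → y < m0 + d → y ∈ used := by
        intro y hy1 hy2 hy3
        rcases lt_or_ge y m0 with h | h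
        · exact hpre y hy1 hy2 h
        · have : y = m0 := by
            rcases hy1 with ⟨c, rfl⟩
            rcases hdvd with ⟨c0, rfl⟩
            have : c = c0 := by nlinarith
            rw [this]
          rwa [this]
      have hex' : ∃ j : Nat, j < k ∧ (m0 + d) + d * j ∉ used := by
        rcases hex with ⟨j, hj, hnot⟩
        rcases j with _ | j'
        · simp at hnot; exact absurd hm hnot
        · refine ⟨j', by omega, ?_⟩
          have he : m0 + d * ((j' + 1 : Nat) : Int) = (m0 + d) + d * (j' : Nat) := by
            push_cast; ring
          rwa [he] at hnot
      have := ih (m0 + d) (by exact Dvd.dvd.add hdvd ⟨1, by ring⟩) (by omega) hstep hex'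
      simpa [scanMult, hm] using this
    · simp only [scanMult, if_neg hm]
      exact ⟨hm, hdvd, hge, hpre⟩

theorem scanMult_spec {used : List Int} (hnd : used.Nodup) {d : Int} (hd : 1 ≤ d)
    {m0 : Int} (h1 : d ∣ m0) (h2 : d ≤ m0)
    (h3 : ∀ y, d ∣ y → d ≤ y → y < m0 → y ∈ used) :
    IsLUM used d (scanMult used d (used.length + 1) m0) := by
  apply scanMult_go hd _ _ h1 h2 h3
  rcases exists_escape hnd hd m0 with ⟨j, hj, hnot⟩
  exact ⟨j, by omega, hnot⟩

-- any unused multiple of d is bounded below by a least unused multiple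
theorem exists_isLUM_le {used : List Int} (hnd : used.Nodup) {d m : Int}
    (hd : 1 ≤ d) (hdm : d ∣ m) (hm : d ≤ m) (hmu : m ∉ used) :
    ∃ r, IsLUM used d r ∧ r ≤ m := by
  refine ⟨scanMult used d (used.length + 1) d, scanMult_spec hnd hd ⟨1, by ring⟩ le_rfl ?_, ?_⟩
  · intro y _ hy2 hy3; omega
  · rcases scanMult_spec hnd hd (⟨1, by ring⟩ : d ∣ d) le_rfl (fun y _ h2 h3 => by omega) with
      ⟨hn, _, _, hmin⟩
    by_contra hlt
    push_neg at hlt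
    exact hmu (hmin m hdm hm hlt)

def divGadget (n d : Int) : List Int :=
  if PySem.Int.mod n d = 0 then
    (if 2 ≤ d then [d] else []) ++
      (if 2 ≤ PySem.Int.floordiv n d ∧ PySem.Int.floordiv n d ≠ d then [PySem.Int.floordiv n d] else [])
  else []

theorem divisorsFrom2_eq (n : Int) :
    divisorsFrom2 n =
      (PySem.List.pyRange 1 ((Nat.sqrt n.toNat : Int) + 1) 1).flatMap (divGadget n) := by
  unfold divisorsFrom2
  have h1 : (PySem.List.pyRange 1 ((Nat.sqrt n.toNat : Int) + 1) 1).foldl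
      (fun ds d =>
        if PySem.Int.mod n d = 0 then
          let q := PySem.Int.floordiv n d
          (ds ++ (if 2 ≤ d then [d] else [])) ++ (if 2 ≤ q ∧ q ≠ d then [q] else [])
        else ds) [] =
      (PySem.List.pyRange 1 ((Nat.sqrt n.toNat : Int) + 1) 1).foldl
        (fun ds d => ds ++ divGadget n d) [] := by
    apply PySem.List.foldl_congr_mem
    intro acc x _
    unfold divGadget
    by_cases h : PySem.Int.mod n x = 0 <;> simp [h]
  rw [h1]
  simpa using PySem.List.foldl_append_eq_flatMap (divGadget n) _ []

theorem divisorsFrom2_mem {n : Int} (hn : 2 ≤ n) (x : Int) :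
    x ∈ divisorsFrom2 n ↔ 2 ≤ x ∧ x ∣ n := by
  rw [divisorsFrom2_eq, List.mem_flatMap]
  constructor
  · rintro ⟨d, hd, hx⟩
    have hdr := PySem.List.mem_pyRange_one.mp hd
    have hd1 : 1 ≤ d := hdr.1
    unfold divGadget at hx
    by_cases hm : PySem.Int.mod n d = 0
    · have hdvd : d ∣ n := (PySem.Int.mod_eq_zero_iff_dvd n d).mp hm
      rw [if_pos hm] at hx
      rcases List.mem_append.mp hx with h | h
      · split_ifs at h with h2
        · rcases List.mem_singleton.mp h with rfl
          exact ⟨h2, hdvd⟩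
        · simp at h
      · split_ifs at h with h2
        · rcases List.mem_singleton.mp h with rfl
          refine ⟨h2.1, ?_⟩
          rw [PySem.Int.floordiv_eq_ediv_of_pos (by omega)]
          exact ⟨d, (Int.ediv_mul_cancel hdvd).symm⟩
        · simp at h
    · rw [if_neg hm] at hx; simp at hx
  · rintro ⟨hx2, hxd⟩
    have hxn : x ≤ n := Int.le_of_dvd (by omega) hxd
    have hx0 : 0 < x := by omega
    have hsq : ∀ e : Int, 0 < e → e * e ≤ n → e ≤ (Nat.sqrt n.toNat : Int) := by
      intro e he hee
      have h1 : e.toNat * e.toNat ≤ n.toNat := by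
        have := Int.toNat_le_toNat hee
        calc e.toNat * e.toNat = (e*e).toNat := by
              rw [Int.toNat_mul] <;> omega
          _ ≤ n.toNat := by omega
      have := Nat.le_sqrt.mpr (by exact h1)
      omega
    by_cases hc : x * x ≤ n
    · refine ⟨x, ?_, ?_⟩
      · exact PySem.List.mem_pyRange_one.mpr ⟨by omega, by have := hsq x hx0 hc; omega⟩
      · unfold divGadget
        rw [if_pos ((PySem.Int.mod_eq_zero_iff_dvd n x).mpr hxd), if_pos hx2]
        simp
    · push_neg at hc
      set e := n / x with he
      have hne : n = x * e := (Int.ediv_mul_cancel hxd).symm.trans (by ring)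
      have he1 : 1 ≤ e := by
        rcases Int.lt_or_le e 1 with h | h
        · exfalso; nlinarith
        · exact h
      have helt : e < x := by nlinarith
      refine ⟨e, ?_, ?_⟩
      · refine PySem.List.mem_pyRange_one.mpr ⟨he1, ?_⟩
        have : e * e ≤ n := by nlinarith
        have := hsq e (by omega) this
        omega
      · have hedvd : e ∣ n := ⟨x, by rw [hne]; ring⟩
        have hq : PySem.Int.floordiv n e = x := by
          rw [PySem.Int.floordiv_eq_ediv_of_pos (by omega), hne,
            Int.mul_ediv_cancel _ (by omega)]
        unfold divGadget
        rw [if_pos ((PySem.Int.mod_eq_zero_iff_dvd n e).mpr hedvd)]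
        rw [hq]
        have hcond : 2 ≤ x ∧ x ≠ e := ⟨hx2, by omega⟩
        rw [if_pos hcond]
        simp

theorem gcd_ne_one_iff {a m : Int} (ha : 2 ≤ a) :
    Int.gcd a m ≠ 1 ↔ ∃ d, 2 ≤ d ∧ d ∣ a ∧ d ∣ m := by
  constructor
  · intro h
    refine ⟨(Int.gcd a m : Int), ?_, Int.gcd_dvd_left a m, Int.gcd_dvd_right a m⟩
    have h0 : Int.gcd a m ≠ 0 := by
      intro h0
      have := Int.gcd_eq_zero_iff.mp h0
      omega
    omega
  · rintro ⟨d, hd2, hda, hdm⟩ hg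
    have : d ∣ (Int.gcd a m : Int) := by
      rw [Int.coe_gcd]; exact dvd_gcd hda hdm
    rw [hg] at this
    have h1 := Int.le_of_dvd (by norm_num) this
    omega

theorem stepB_spec {limit : Int} {used : List Int} (hnd : used.Nodup) :
    ∀ (ds : List Int) (best : Option Int) (ptr : PySem.Dict Int Int),
    Pinv used ptr → (∀ d ∈ ds, 1 ≤ d) →
    (Pinv used (stepB limit used ds best ptr).2) ∧
    (∀ r, (stepB limit used ds best ptr).1 = some r →
        best = some r ∨ ∃ d ∈ ds, IsLUM used d r ∧ r < limit) ∧
    (∀ d ∈ ds, ∀ v, IsLUM used d v → v < limit →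
        ∃ r, (stepB limit used ds best ptr).1 = some r ∧ r ≤ v) ∧
    (∀ b, best = some b → ∃ r, (stepB limit used ds best ptr).1 = some r ∧ r ≤ b) := by
  intro ds
  induction ds with
  | nil =>
    intro best ptr hp _
    refine ⟨hp, ?_, by simp, ?_⟩
    · intro r hr; exact Or.inl hr
    · intro b hb; exact ⟨b, hb, le_rfl⟩
  | cons d ds ih =>
    intro best ptr hp hds
    have hd1 : 1 ≤ d := hds d (List.mem_cons_self)
    set m := scanMult used d (used.length + 1) (ptr.getD d d) with hm
    have hlum : IsLUM used d m := by
      rcases hp d with ⟨ha, hb, hc⟩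
      exact scanMult_spec hnd hd1 ha hb hc
    set best' : Option Int :=
      (match best with
      | none => if m < limit then some m else none
      | some b => if m < limit ∧ m < b then some m else some b) with hbest'
    have hstep : stepB limit used (d :: ds) best ptr =
        stepB limit used ds best' (ptr.insert d m) := by
      simp only [stepB, ← hm, ← hbest']
    have hp' : Pinv used (ptr.insert d m) := by
      intro e
      rw [PySem.Dict.getD_insert]
      by_cases he : e = d
      · subst he
        simp only [if_pos rfl]
        exact ⟨hlum.2.1, hlum.2.2.1, hlum.2.2.2⟩
      · simp only [if_neg he]
        exact hp e
    rcases ih best' (ptr.insert d m) hp' (fun d' hd' => hds d' (List.mem_cons_of_mem _ hd'))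
      with ⟨ihp, ih1, ih2, ih3⟩
    rw [hstep]
    refine ⟨ihp, ?_, ?_, ?_⟩
    · intro r hr
      rcases ih1 r hr with hb' | ⟨d', hd', hl', hlt'⟩
      · cases best with
        | none =>
          simp only [hbest'] at hb'
          split_ifs at hb' with hml
          obtain rfl := Option.some.inj hb'
          exact Or.inr ⟨d, List.mem_cons_self, hlum, hml⟩
        | some b =>
          simp only [hbest'] at hb'
          split_ifs at hb' with hml
          · obtain rfl := Option.some.inj hb'
            exact Or.inr ⟨d, List.mem_cons_self, hlum, hml.1⟩
          · exact Or.inl hb'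
      · exact Or.inr ⟨d', List.mem_cons_of_mem _ hd', hl', hlt'⟩
    · intro d' hd' v hv hvlt
      rcases List.mem_cons.mp hd' with rfl | hd'tail
      · have hvm : v = m := isLUM_unique hv hlum
        subst hvm
        have hex : ∃ b', best' = some b' ∧ b' ≤ m := by
          cases best with
          | none => exact ⟨m, by simp [hbest', hvlt], le_rfl⟩
          | some b =>
            by_cases hc : m < limit ∧ m < b
            · exact ⟨m, by simp [hbest', hc], le_rfl⟩
            · have hbm : b ≤ m := by
                rcases not_and_or.mp hc with h | h
                · exact absurd hvlt h
                · omega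
              exact ⟨b, by simp [hbest', hc], hbm⟩
        rcases hex with ⟨b', hb', hble⟩
        rcases ih3 b' hb' with ⟨r, hr, hrle⟩
        exact ⟨r, hr, le_trans hrle hble⟩
      · exact ih2 d' hd'tail v hv hvlt
    · intro b hb
      have hex : ∃ b', best' = some b' ∧ b' ≤ b := by
        subst hb
        by_cases hc : m < limit ∧ m < b
        · exact ⟨m, by simp [hbest', hc], le_of_lt hc.2⟩
        · exact ⟨b, by simp [hbest', hc], le_rfl⟩
      rcases hex with ⟨b', hb', hble⟩
      rcases ih3 b' hb' with ⟨r, hr, hrle⟩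
      exact ⟨r, hr, le_trans hrle hble⟩

-- the numbers both programs may still pick: membership in A's remaining list
theorem mem_numbers {limit : Int} {used : List Int} {y : Int} :
    y ∈ (PySem.List.pyRange 3 limit 1).filter (fun z => decide (z ∉ used)) ↔
      3 ≤ y ∧ y < limit ∧ y ∉ used := by
  rw [List.mem_filter, PySem.List.mem_pyRange_one]
  simp [and_assoc]

-- per-step agreement and outer loop equality
theorem loop_eq {limit : Int} :
    ∀ (n : Nat) (last : Int) (ekg used : List Int) (ptr : PySem.Dict Int Int),
    used.Nodup → (1 : Int) ∈ used → (2 : Int) ∈ used → 2 ≤ last → Pinv used ptr →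
    loopA last ekg ((PySem.List.pyRange 3 limit 1).filter (fun y => decide (y ∉ used))) n =
      loopB limit last ekg used ptr n := by
  intro n
  induction n with
  | zero => intro last ekg used ptr _ _ _ _ _; rfl
  | succ n ih =>
    intro last ekg used ptr hnd h1u h2u hlast hp
    set numbers := (PySem.List.pyRange 3 limit 1).filter (fun y => decide (y ∉ used)) with hnum
    have hdivs : ∀ d ∈ divisorsFrom2 last, 1 ≤ d := by
      intro d hd
      have := (divisorsFrom2_mem hlast d).mp hd
      omega
    rcases stepB_spec hnd (divisorsFrom2 last) none ptr hp hdivs with ⟨hptr', hs1, hs2, _⟩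
    -- each stepB result is a least candidate; each popA result is a least candidate
    have hcand_of_some : ∀ r, (stepB limit used (divisorsFrom2 last) none ptr).1 = some r →
        (3 ≤ r ∧ r < limit ∧ r ∉ used ∧ Int.gcd last r ≠ 1) := by
      intro r hr
      rcases hs1 r hr with h | ⟨d, hd, hl, hlt⟩
      · simp at h
      · rcases (divisorsFrom2_mem hlast d).mp hd with ⟨hd2, hddvd⟩
        rcases hl with ⟨hru, hrd, hrge, _⟩
        have hr3 : 3 ≤ r := by
          have hne1 : r ≠ 1 := fun h => hru (h ▸ h1u)
          have hne2 : r ≠ 2 := fun h => hru (h ▸ h2u)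
          omega
        exact ⟨hr3, hlt, hru, (gcd_ne_one_iff hlast).mpr ⟨d, hd2, hddvd, hrd⟩⟩
    have hsorted : numbers.Pairwise (· < ·) :=
      (PySem.List.pairwise_lt_pyRange_one 3 limit).filter _
    cases hA : popA last numbers with
    | none =>
      have hnone : (stepB limit used (divisorsFrom2 last) none ptr).1 = none := by
        cases hres : (stepB limit used (divisorsFrom2 last) none ptr).1 with
        | none => rfl
        | some r =>
          rcases hcand_of_some r hres with ⟨hr3, hrlim, hru, hrg⟩
          have hmem : r ∈ numbers := mem_numbers.mpr ⟨hr3, hrlim, hru⟩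
          exact absurd (popA_none.mp hA r hmem) hrg
      simp only [loopA, loopB, hA]
      rcases hres : stepB limit used (divisorsFrom2 last) none ptr with ⟨o, p⟩
      rw [hres] at hnone
      simp at hnone
      subst hnone
      rfl
    | some pr =>
      rcases pr with ⟨x, rest⟩
      rcases popA_some hsorted hA with ⟨hxmem, hxg, hxmin, hrest⟩
      rcases mem_numbers.mp hxmem with ⟨hx3, hxlim, hxu⟩
      -- stepB returns exactly x
      rcases (gcd_ne_one_iff hlast).mp hxg with ⟨d0, hd02, hd0last, hd0x⟩
      have hd0div : d0 ∈ divisorsFrom2 last := (divisorsFrom2_mem hlast d0).mpr ⟨hd02, hd0last⟩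
      have hd0lex : d0 ≤ x := Int.le_of_dvd (by omega) hd0x
      rcases exists_isLUM_le hnd (by omega) hd0x hd0lex hxu with ⟨v, hvlum, hvle⟩
      rcases hs2 d0 hd0div v hvlum (by omega) with ⟨r, hres, hrle⟩
      have hrx : r = x := by
        rcases hcand_of_some r hres with ⟨hr3, hrlim, hru, hrg⟩
        have hmem : r ∈ numbers := mem_numbers.mpr ⟨hr3, hrlim, hru⟩
        have := hxmin r hmem hrg
        omega
      subst hrx
      -- step the two loops
      simp only [loopA, loopB, hA]
      rcases hstep : stepB limit used (divisorsFrom2 last) none ptr with ⟨o, ptr'⟩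
      rw [hstep] at hres hptr'
      have ho : o = some r := hres
      subst ho
      have hp2 : Pinv used ptr' := hptr'
      -- the new used set and remaining list
      have hadd : PySem.Set.add used r = used ++ [r] := by
        simp [PySem.Set.add, PySem.Set.contains, hxu]
      have hndn : numbers.Nodup := (hsorted.imp (fun h => ne_of_lt h))
      have hrest' : rest = (PySem.List.pyRange 3 limit 1).filter
          (fun y => decide (y ∉ used ++ [r])) := by
        rw [hrest, hnum, List.Nodup.erase_eq_filter hndn r, List.filter_filter]
        exact List.filter_congr (fun a _ => by
          by_cases h1 : a = r <;> by_cases h2 : a ∈ used <;> simp [h1, h2])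
      show loopA r (ekg ++ [r]) rest n =
        loopB limit r (ekg ++ [r]) (PySem.Set.add used r) ptr' n
      rw [hadd, hrest']
      apply ih
      · exact hnd.append (by simp) (by simp [List.disjoint_singleton]; exact hxu)
      · simp [h1u]
      · simp [h2u]
      · omega
      · intro e
        rcases hp2 e with ⟨he1, he2, he3⟩
        exact ⟨he1, he2, fun y a b c => List.mem_append_left _ (he3 y a b c)⟩

-- ===== VERDICT (by name: the statement is the Claim_ definition above) =====
theorem EKG_generator_spec : Claim_equal_EKG_generator := by
  intro size _ hpre
  unfold Spec_EKG_generator EKG_generator EKG_generator_alt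
  by_cases h1 : size = 1
  · simp [h1]
  by_cases h2 : size = 2
  · simp [h2]
  have h3 : ¬ size < 1 := by unfold Pre_EKG_generator at hpre; omega
  simp only [h1, h2, h3, if_false]
  have hinit : PySem.List.pyRange 3 (14 * size) 1 =
      (PySem.List.pyRange 3 (14 * size) 1).filter (fun y => decide (y ∉ ([1, 2] : List Int))) := by
    symm
    apply List.filter_eq_self.mpr
    intro y hy
    have := PySem.List.mem_pyRange_one.mp hy
    simp only [decide_eq_true_iff, List.mem_cons, List.not_mem_nil, or_false]
    push_neg
    omega
  have hset : PySem.Set.ofList ([1, 2] : List Int) = [1, 2] := by decide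
  rw [hinit, hset]
  apply loop_eq
  · decide
  · simp
  · simp
  · omega
  · intro e
    rw [PySem.Dict.getD_empty]
    exact ⟨dvd_refl e, le_rfl, fun y _ hb hc => by omega⟩
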